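-- pv_equiv track=rewrite | github.com/wjs2063/Python-Coding-test- | Kakao/카카오(순위검색).py | calc
-- ===== SOURCE A (Python) =====
-- import bisect
--
-- language=['cpp','python','java']
--
-- job=['backend','frontend']
--
-- career=['senior','junior']
--
-- food=['pizza','chicken']
--
-- def calc(frame,a,b,c,d,e):
--     if a=='-':
--         cnt=0
--         for item in language:
--             cnt+=calc(frame,item,b,c,d,e)
--         return cnt
--     if b=='-':
--         cnt=0
--         for item in job:
--             cnt+=calc(frame,a,item,c,d,e)
--         return cnt
--     if c=='-':
--         cnt=0
--         for item in career:
--             cnt+=calc(frame,a,b,item,d,e)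
--         return cnt
--     if d=='-':
--         cnt=0
--         for item in food:
--             cnt+=calc(frame,a,b,c,item,e)
--         return cnt
--
--     idx=bisect.bisect_left(frame[a][b][c][d],e)
--     return len(frame[a][b][c][d])-idx
-- ===== SOURCE B (Python) =====
-- import bisect
--
-- language=['cpp','python','java']
--
-- job=['backend','frontend']
--
-- career=['senior','junior']
--
-- food=['pizza','chicken']
--
-- def calc(frame,a,b,c,d,e):
--     cand_a = language if a == '-' else [a]
--     cand_b = job if b == '-' else [b]
--     cand_c = career if c == '-' else [c]
--     cand_d = food if d == '-' else [d]
--     keys = [(w, x, y, z) for w in cand_a for x in cand_b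
--             for y in cand_c for z in cand_d]
--     total = 0
--     for w, x, y, z in keys:
--         scores = frame[w][x][y][z]
--         total += len(scores) - bisect.bisect_left(scores, e)
--     return total
-- ===== Notes on version B (the rewrite author's own statement) =====
-- stated objective: simpler
-- what changed: Replaces the four-level self-recursion with wildcard re-dispatch by building the four candidate lists once, expanding them into a flat list of key tuples, and summing the per-key counts in a single loop.
import Mathlib
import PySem

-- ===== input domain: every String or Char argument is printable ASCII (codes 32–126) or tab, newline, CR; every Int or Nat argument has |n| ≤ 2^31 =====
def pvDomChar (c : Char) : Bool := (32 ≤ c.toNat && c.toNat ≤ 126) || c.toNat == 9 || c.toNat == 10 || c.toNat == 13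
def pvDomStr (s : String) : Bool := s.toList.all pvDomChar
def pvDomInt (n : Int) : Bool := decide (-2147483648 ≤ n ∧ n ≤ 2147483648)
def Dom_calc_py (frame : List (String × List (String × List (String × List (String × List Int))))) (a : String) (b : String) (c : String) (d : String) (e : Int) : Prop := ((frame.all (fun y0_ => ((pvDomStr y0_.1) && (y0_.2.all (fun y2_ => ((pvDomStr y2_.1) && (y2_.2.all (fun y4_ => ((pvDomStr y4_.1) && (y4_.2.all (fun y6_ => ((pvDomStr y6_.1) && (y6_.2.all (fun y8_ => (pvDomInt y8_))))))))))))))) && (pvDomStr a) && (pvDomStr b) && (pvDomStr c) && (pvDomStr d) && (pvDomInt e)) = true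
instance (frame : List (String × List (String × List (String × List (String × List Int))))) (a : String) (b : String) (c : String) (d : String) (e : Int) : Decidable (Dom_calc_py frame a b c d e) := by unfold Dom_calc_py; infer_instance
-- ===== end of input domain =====

-- B replaces A's four-level wildcard self-recursion by a single loop over the expanded list
-- of key tuples (objective: simpler). Equivalence is about the return value; where Python
-- raises KeyError (a looked-up key absent from the dict) the inputs are excluded by Pre_.

-- shared helpers: dict indexing d[k] on an association list (first match), as in both Pythons
def pvGet {α : Type} (l : List (String × α)) (k : String) : Option α :=
  (l.find? (fun p => p.1 == k)).map (·.2)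

-- frame[w][x][y][z]; none = KeyError somewhere along the chain (excluded by Pre_)
def pvScores (frame : List (String × List (String × List (String × List (String × List Int))))) (w x y z : String) : Option (List Int) := do
  let f1 ← pvGet frame w
  let f2 ← pvGet f1 x
  let f3 ← pvGet f2 y
  pvGet f3 z

def pvLanguage : List String := ["cpp", "python", "java"]
def pvJob : List String := ["backend", "frontend"]
def pvCareer : List String := ["senior", "junior"]
def pvFood : List String := ["pizza", "chicken"]

-- ===== PORT A =====
-- len(frame[a][b][c][d]) - bisect_left(frame[a][b][c][d], e); the [] default is unreachable under Pre_
def calcLeaf (frame : List (String × List (String × List (String × List (String × List Int))))) (a b c d : String) (e : Int) : Int :=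
  let lst := (pvScores frame a b c d).getD []
  (lst.length : Int) - (PySem.List.bisectLeft lst e : Int)

-- A's recursion re-enters calc with a constant ≠ '-' substituted for the wildcard, so each
-- recursive call falls through to the next 'if'; the four levels are transcribed as calcA..calcD.
def calcD (frame : List (String × List (String × List (String × List (String × List Int))))) (a b c d : String) (e : Int) : Int :=
  if d = "-" then pvFood.foldl (fun cnt item => cnt + calcLeaf frame a b c item e) 0
  else calcLeaf frame a b c d e

def calcC (frame : List (String × List (String × List (String × List (String × List Int))))) (a b c d : String) (e : Int) : Int :=
  if c = "-" then pvCareer.foldl (fun cnt item => cnt + calcD frame a b item d e) 0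
  else calcD frame a b c d e

def calcB (frame : List (String × List (String × List (String × List (String × List Int))))) (a b c d : String) (e : Int) : Int :=
  if b = "-" then pvJob.foldl (fun cnt item => cnt + calcC frame a item c d e) 0
  else calcC frame a b c d e

def calc_py (frame : List (String × List (String × List (String × List (String × List Int))))) (a : String) (b : String) (c : String) (d : String) (e : Int) : Int :=
  if a = "-" then pvLanguage.foldl (fun cnt item => cnt + calcB frame item b c d e) 0
  else calcB frame a b c d e

-- ===== PORT B =====
def pvCand (s : String) (opts : List String) : List String := if s = "-" then opts else [s]

def calc_py_alt (frame : List (String × List (String × List (String × List (String × List Int))))) (a : String) (b : String) (c : String) (d : String) (e : Int) : Int :=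
  let keys : List (String × String × String × String) :=
    (pvCand a pvLanguage).flatMap (fun w =>
      (pvCand b pvJob).flatMap (fun x =>
        (pvCand c pvCareer).flatMap (fun y =>
          (pvCand d pvFood).map (fun z => (w, x, y, z)))))
  keys.foldl (fun total k =>
    let scores := (pvScores frame k.1 k.2.1 k.2.2.1 k.2.2.2).getD []
    total + ((scores.length : Int) - (PySem.List.bisectLeft scores e : Int))) 0

-- ===== PRECONDITION & SPEC =====
-- Pre_ excludes exactly the inputs on which Python A raises KeyError: some expanded key tuple
-- is missing from the nested dicts.
def Pre_calc_py (frame : List (String × List (String × List (String × List (String × List Int))))) (a : String) (b : String) (c : String) (d : String) (e : Int) : Prop :=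
  ∀ w ∈ pvCand a pvLanguage, ∀ x ∈ pvCand b pvJob, ∀ y ∈ pvCand c pvCareer, ∀ z ∈ pvCand d pvFood,
    (pvScores frame w x y z).isSome = true
instance (frame : List (String × List (String × List (String × List (String × List Int))))) (a : String) (b : String) (c : String) (d : String) (e : Int) : Decidable (Pre_calc_py frame a b c d e) := by unfold Pre_calc_py; infer_instance

def pvWitness_calc_py : (List (String × List (String × List (String × List (String × List Int))))) × String × String × String × String × Int :=
  ([("cpp", [("backend", [("senior", [("pizza", [1, 2, 3])])])])], "cpp", "backend", "senior", "pizza", 2)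

def Spec_calc_py (frame : List (String × List (String × List (String × List (String × List Int))))) (a : String) (b : String) (c : String) (d : String) (e : Int) (out : Int) : Prop := out = calc_py_alt frame a b c d e
instance (frame : List (String × List (String × List (String × List (String × List Int))))) (a : String) (b : String) (c : String) (d : String) (e : Int) (out : Int) : Decidable (Spec_calc_py frame a b c d e out) := by unfold Spec_calc_py; infer_instance

-- ===== CLAIM (what is proved, stated in full; the proofs are below) =====
def Claim_equal_calc_py : Prop := ∀ (frame : List (String × List (String × List (String × List (String × List Int))))) (a : String) (b : String) (c : String) (d : String) (e : Int), Dom_calc_py frame a b c d e → Pre_calc_py frame a b c d e → Spec_calc_py frame a b c d e (calc_py frame a b c d e)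

-- ===== LEMMAS AND PROOFS =====

-- ===== VERDICT (by name: the statement is the Claim_ definition above) =====
theorem calc_py_spec : Claim_equal_calc_py := by
  intro frame a b c d e _ _
  show calc_py frame a b c d e = calc_py_alt frame a b c d e
  by_cases ha : a = "-" <;> by_cases hb : b = "-" <;> by_cases hc : c = "-" <;> by_cases hd : d = "-" <;>
    simp [calc_py, calc_py_alt, calcB, calcC, calcD, calcLeaf, pvCand, ha, hb, hc, hd,
      pvLanguage, pvJob, pvCareer, pvFood, List.foldl, List.flatMap] <;> ring
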